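-- pv_equiv track=rewrite | github.com/ptmlewis/prime-coin-combinations | Pay_in_Coins.py | get_combinations2
-- ===== SOURCE A (Python) =====
-- def get_combinations2(primes,money_owed,num_coins):
--     dp = [[0 for _ in range(money_owed + 1)] for _ in range(num_coins + 1)]
--     dp[0][0] = 1
--     for coin in primes:
--         for i in range(1, num_coins + 1):
--             for j in range(coin,money_owed + 1):
--                     dp[i][j] = dp[i][j] + dp[i-1][j-coin]
--     return dp[num_coins][money_owed]
-- ===== SOURCE B (Python) =====
-- def get_combinations2(primes, money_owed, num_coins):
--     # Top-down memoized recursion over (index into primes, coins left, amount left).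
--     memo = {}
--     def count(idx, k, amt):
--         if k == 0:
--             return 1 if amt == 0 else 0
--         if idx == 0:
--             return 0
--         key = (idx, k, amt)
--         if key not in memo:
--             c = primes[idx - 1]
--             skip = count(idx - 1, k, amt)
--             take = count(idx, k - 1, amt - c) if amt >= c else 0
--             memo[key] = skip + take
--         return memo[key]
--     return count(len(primes), num_coins, money_owed)
-- ===== Notes on version B (the rewrite author's own statement) =====
-- stated objective: alternative
-- what changed: Replaces the bottom-up (num_coins+1)x(money_owed+1) table filled by triple nested loops with a top-down dict-memoized recursion over (prime index, coins left, amount left) that only visits reachable states.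
import Mathlib
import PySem

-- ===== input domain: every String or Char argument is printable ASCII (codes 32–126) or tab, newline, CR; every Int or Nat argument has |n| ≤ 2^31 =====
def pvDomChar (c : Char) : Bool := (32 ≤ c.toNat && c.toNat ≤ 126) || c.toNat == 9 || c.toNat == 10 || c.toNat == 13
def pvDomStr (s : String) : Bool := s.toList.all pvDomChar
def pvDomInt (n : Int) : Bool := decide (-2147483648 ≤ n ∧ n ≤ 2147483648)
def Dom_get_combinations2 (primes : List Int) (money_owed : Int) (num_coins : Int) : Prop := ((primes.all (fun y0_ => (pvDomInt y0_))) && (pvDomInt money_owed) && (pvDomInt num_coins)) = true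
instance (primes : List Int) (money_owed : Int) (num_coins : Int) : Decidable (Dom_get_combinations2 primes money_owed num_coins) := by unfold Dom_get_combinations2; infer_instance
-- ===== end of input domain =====

-- B re-implements A's table DP as a top-down recursion over (prime index, coins left, amount left);
-- the python B memoizes that recursion with a dict, a pure value cache, so the Lean port is the plain recursion.

-- ===== PORT A =====
-- dp[i][j] read; Python negative indices wrap — pyGetD is exact for that (default only where Python raises, excluded by Pre_)
def pvGet2 (dp : List (List Int)) (i j : Int) : Int :=
  PySem.List.pyGetD (PySem.List.pyGetD dp i []) j 0

-- dp[i][j] = v; exact for 0 ≤ i < len dp, 0 ≤ j < row length — the only writes A performs on inputs admitted by Pre_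
def pvSet2 (dp : List (List Int)) (i j v : Int) : List (List Int) :=
  dp.set i.toNat ((dp.getD i.toNat []).set j.toNat v)

-- the (num_coins+1) x (money_owed+1) zero table of line 2 of A
def pvInit (money_owed num_coins : Int) : List (List Int) :=
  (PySem.List.pyRange 0 (num_coins + 1) 1).map
    (fun _ => (PySem.List.pyRange 0 (money_owed + 1) 1).map (fun _ => (0 : Int)))

-- the body of A's 'for coin in primes' loop: the two nested index loops
def pvCoinPass (money_owed num_coins : Int) (dp : List (List Int)) (coin : Int) : List (List Int) :=
  (PySem.List.pyRange 1 (num_coins + 1) 1).foldl (fun dp i =>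
    (PySem.List.pyRange coin (money_owed + 1) 1).foldl (fun dp j =>
      pvSet2 dp i j (pvGet2 dp i j + pvGet2 dp (i - 1) (j - coin))) dp) dp

def get_combinations2 (primes : List Int) (money_owed : Int) (num_coins : Int) : Int :=
  pvGet2 (primes.foldl (pvCoinPass money_owed num_coins) (pvSet2 (pvInit money_owed num_coins) 0 0 1))
    num_coins money_owed

-- ===== PORT B =====
-- count(idx, k, amt) of Source B (the memo dict caches values of this same function; ported as the recursion itself)
def pvCount (primes : List Int) (idx : Nat) (k : Nat) (amt : Int) : Int :=
  if k = 0 then (if amt = 0 then 1 else 0)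
  else match idx with
    | 0 => 0
    | idx' + 1 =>
      let c := primes.getD idx' 0   -- primes[idx-1]; in Source B 1 ≤ idx ≤ len(primes), always in range
      pvCount primes idx' k amt + (if c ≤ amt then pvCount primes (idx' + 1) (k - 1) (amt - c) else 0)
  termination_by (k, idx)

def get_combinations2_alt (primes : List Int) (money_owed : Int) (num_coins : Int) : Int :=
  pvCount primes primes.length num_coins.toNat money_owed

-- ===== PRECONDITION & SPEC =====
-- Pre_ admits exactly the inputs on which A returns: A raises IndexError whenever money_owed < 0 or
-- num_coins < 0 (dp[0][0] = 1 hits an empty table) and whenever num_coins ≥ 1 and primes contains a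
-- negative coin (dp[i-1][j-coin] is read past the row end at j = money_owed).
def Pre_get_combinations2 (primes : List Int) (money_owed : Int) (num_coins : Int) : Prop :=
  0 ≤ money_owed ∧ 0 ≤ num_coins ∧ (0 < num_coins → ∀ p ∈ primes, 0 ≤ p)
instance (primes : List Int) (money_owed : Int) (num_coins : Int) : Decidable (Pre_get_combinations2 primes money_owed num_coins) := by unfold Pre_get_combinations2; infer_instance

def pvWitness_get_combinations2 : List Int × Int × Int := ([2, 3, 5], 10, 3)

def Spec_get_combinations2 (primes : List Int) (money_owed : Int) (num_coins : Int) (out : Int) : Prop := out = get_combinations2_alt primes money_owed num_coins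
instance (primes : List Int) (money_owed : Int) (num_coins : Int) (out : Int) : Decidable (Spec_get_combinations2 primes money_owed num_coins out) := by unfold Spec_get_combinations2; infer_instance

-- ===== CLAIM (what is proved, stated in full; the proofs are below) =====
def Claim_equal_get_combinations2 : Prop := ∀ (primes : List Int) (money_owed : Int) (num_coins : Int), Dom_get_combinations2 primes money_owed num_coins → Pre_get_combinations2 primes money_owed num_coins → Spec_get_combinations2 primes money_owed num_coins (get_combinations2 primes money_owed num_coins)

-- ===== LEMMAS AND PROOFS =====

def gN (dp : List (List Int)) (i j : Nat) : Int := (dp.getD i []).getD j 0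

def WFt (dp : List (List Int)) (n m : Nat) : Prop := dp.length = n + 1 ∧ ∀ r ∈ dp, r.length = m + 1

theorem row_len {dp : List (List Int)} {n m : Nat} (h : WFt dp n m) {i : Nat} (hi : i ≤ n) :
    (dp.getD i []).length = m + 1 := by
  have hlt : i < dp.length := by have := h.1; omega
  rw [List.getD_eq_getElem _ _ hlt]
  exact h.2 _ (List.getElem_mem hlt)

theorem gN_set {dp : List (List Int)} {n m : Nat} (h : WFt dp n m) {i j : Nat} (hi : i ≤ n) (hj : j ≤ m)
    (v : Int) (i' j' : Nat) :
    gN (dp.set i ((dp.getD i []).set j v)) i' j' = if i' = i ∧ j' = j then v else gN dp i' j' := by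
  have hlt : i < dp.length := by have := h.1; omega
  have hrl : (dp.getD i []).length = m + 1 := row_len h hi
  by_cases hii : i' = i
  · subst hii
    rw [show gN (dp.set i' ((dp.getD i' []).set j v)) i' j' = ((dp.getD i' []).set j v).getD j' 0 from by
      simp [gN, List.getD_eq_getElem?_getD, List.getElem?_set_self, hlt]]
    by_cases hjj : j' = j
    · subst hjj
      simp only [List.getD_eq_getElem?_getD] at hrl
      simp [List.getD_eq_getElem?_getD, List.getElem?_set_self, show j' < (dp[i']?.getD []).length by omega]
    · simp [gN, List.getD_eq_getElem?_getD, List.getElem?_set_ne (fun hq => hjj hq.symm), hjj]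
  · simp [gN, List.getD_eq_getElem?_getD, List.getElem?_set_ne (fun hq => hii hq.symm), hii]

theorem WFt_set {dp : List (List Int)} {n m : Nat} (h : WFt dp n m) {i j : Nat} (hi : i ≤ n) (hj : j ≤ m)
    (v : Int) : WFt (dp.set i ((dp.getD i []).set j v)) n m := by
  refine ⟨by simp [h.1], ?_⟩
  intro r hr
  rcases List.mem_or_eq_of_mem_set hr with hmem | heq
  · exact h.2 _ hmem
  · subst heq
    have := row_len h hi
    simp only [List.getD_eq_getElem?_getD] at this
    simp [this]

theorem pvGet2_cast (dp : List (List Int)) (i j : Nat) : pvGet2 dp (↑i) (↑j) = gN dp i j := by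
  simp [pvGet2, gN, PySem.List.pyGetD_natCast]

theorem pvSet2_cast (dp : List (List Int)) (i j : Nat) (v : Int) :
    pvSet2 dp (↑i) (↑j) v = dp.set i ((dp.getD i []).set j v) := by
  simp [pvSet2]

-- the j-loop of A: one row pass with coin cn starting at column an
theorem inner_char (m n cn i : Nat) (hi1 : 1 ≤ i) (hin : i ≤ n) :
    ∀ (an : Nat), cn ≤ an → ∀ (dp : List (List Int)), WFt dp n m →
    WFt ((PySem.List.pyRange (↑an) ((↑m : Int) + 1) 1).foldl
      (fun dp j => pvSet2 dp (↑i) j (pvGet2 dp (↑i) j + pvGet2 dp ((↑i : Int) - 1) (j - (↑cn : Int)))) dp) n m ∧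
    ∀ i' j' : Nat, i' ≤ n → j' ≤ m →
      gN ((PySem.List.pyRange (↑an) ((↑m : Int) + 1) 1).foldl
        (fun dp j => pvSet2 dp (↑i) j (pvGet2 dp (↑i) j + pvGet2 dp ((↑i : Int) - 1) (j - (↑cn : Int)))) dp) i' j'
      = if i' = i ∧ an ≤ j' then gN dp i' j' + gN dp (i - 1) (j' - cn) else gN dp i' j' := by
  intro an
  induction hfuel : (m + 1 - an) generalizing an with
  | zero =>
    intro hca dp hwf
    rw [PySem.List.pyRange_one_eq_nil (by push_cast; omega)]
    simp only [List.foldl_nil]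
    refine ⟨hwf, ?_⟩
    intro i' j' hi' hj'
    rw [if_neg (by omega)]
  | succ t ih =>
    intro hca dp hwf
    have han : an < m + 1 := by omega
    rw [PySem.List.pyRange_one_cons (by push_cast; omega)]
    simp only [List.foldl_cons]
    -- the head step writes cell (i, an)
    have hcast1 : ((↑i : Int)) - 1 = ((↑(i - 1) : Nat) : Int) := by push_cast; omega
    have hcast2 : ((↑an : Int)) - (↑cn : Int) = ((↑(an - cn) : Nat) : Int) := by push_cast; omega
    have hstep : pvSet2 dp (↑i) (↑an) (pvGet2 dp (↑i) (↑an) + pvGet2 dp ((↑i : Int) - 1) ((↑an : Int) - (↑cn : Int)))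
        = dp.set i ((dp.getD i []).set an (gN dp i an + gN dp (i - 1) (an - cn))) := by
      rw [hcast1, hcast2, pvGet2_cast, pvGet2_cast, pvSet2_cast]
    have hcast3 : ((↑an : Int)) + 1 = ((↑(an + 1) : Nat) : Int) := by push_cast; omega
    rw [hstep, hcast3]
    set dp1 := dp.set i ((dp.getD i []).set an (gN dp i an + gN dp (i - 1) (an - cn))) with hdp1
    have hwf1 : WFt dp1 n m := WFt_set hwf hin (by omega) _
    obtain ⟨hwfR, hR⟩ := ih (an + 1) (by omega) (by omega) dp1 hwf1
    refine ⟨hwfR, ?_⟩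
    intro i' j' hi' hj'
    rw [hR i' j' hi' hj']
    have hg1 : ∀ a b : Nat, a ≤ n → b ≤ m → gN dp1 a b = if a = i ∧ b = an then gN dp i an + gN dp (i - 1) (an - cn) else gN dp a b :=
      fun a b ha hb => gN_set hwf hin (by omega) _ a b
    by_cases hcase : i' = i ∧ an + 1 ≤ j'
    · rw [if_pos hcase, if_pos (by omega)]
      rw [hg1 i' j' hi' hj', hg1 (i - 1) (j' - cn) (by omega) (by omega)]
      rw [if_neg (by omega), if_neg (by omega)]
    · rw [if_neg hcase, hg1 i' j' hi' hj']
      by_cases hw : i' = i ∧ j' = an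
      · rw [if_pos hw, if_pos (by omega)]
        rw [hw.1, hw.2]
      · rw [if_neg hw, if_neg (by omega)]

theorem pvCount_k0 (P : List Int) (idx : Nat) (amt : Int) :
    pvCount P idx 0 amt = if amt = 0 then 1 else 0 := by
  rw [pvCount.eq_def]; simp

theorem pvCount_idx0 (P : List Int) (k : Nat) (amt : Int) (hk : k ≠ 0) :
    pvCount P 0 k amt = 0 := by
  rw [pvCount.eq_def]; simp [hk]

theorem pvCount_succ (P : List Int) (idx' k : Nat) (amt : Int) (hk : k ≠ 0) :
    pvCount P (idx' + 1) k amt = pvCount P idx' k amt +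
      (if P.getD idx' 0 ≤ amt then pvCount P (idx' + 1) (k - 1) (amt - P.getD idx' 0) else 0) := by
  conv_lhs => rw [pvCount.eq_def]
  simp [hk]

theorem pvCount_append (L : List Int) (c : Int) (k : Nat) :
    ∀ idx, idx ≤ L.length → ∀ amt, pvCount (L ++ [c]) idx k amt = pvCount L idx k amt := by
  induction k using Nat.strong_induction_on with
  | _ k ihk =>
    intro idx
    induction idx with
    | zero =>
      intro _ amt
      rcases Nat.eq_zero_or_pos k with hk | hk
      · subst hk; rw [pvCount_k0, pvCount_k0]
      · have hk' : k ≠ 0 := by omega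
        rw [pvCount_idx0 _ _ _ hk', pvCount_idx0 _ _ _ hk']
    | succ idx' ihi =>
      intro hle amt
      rcases Nat.eq_zero_or_pos k with hk | hk
      · subst hk; rw [pvCount_k0, pvCount_k0]
      · have hk' : k ≠ 0 := by omega
        rw [pvCount_succ (L ++ [c]) idx' k amt hk', pvCount_succ L idx' k amt hk']
        have hidx : idx' < L.length := by omega
        have hgetD : (L ++ [c]).getD idx' 0 = L.getD idx' 0 := by
          simp [List.getD_eq_getElem?_getD, List.getElem?_append_left hidx]
        rw [hgetD, ihi (by omega), ihk (k - 1) (by omega) (idx' + 1) hle]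

theorem iloop_aux (m n cn : Nat) (L : List Int) :
    ∀ (t : Nat), t ≤ n → ∀ dp, WFt dp n m →
    (∀ i' j' : Nat, i' ≤ n → j' ≤ m → gN dp i' j' =
      if i' ≤ t then pvCount (L ++ [(↑cn : Int)]) (L.length + 1) i' (↑j') else pvCount L L.length i' (↑j')) →
    WFt ((PySem.List.pyRange (↑(t + 1) : Int) ((↑n : Int) + 1) 1).foldl
        (fun dp i => (PySem.List.pyRange (↑cn : Int) ((↑m : Int) + 1) 1).foldl
          (fun dp j => pvSet2 dp i j (pvGet2 dp i j + pvGet2 dp (i - 1) (j - (↑cn : Int)))) dp) dp) n m ∧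
    ∀ i' j' : Nat, i' ≤ n → j' ≤ m →
      gN ((PySem.List.pyRange (↑(t + 1) : Int) ((↑n : Int) + 1) 1).foldl
        (fun dp i => (PySem.List.pyRange (↑cn : Int) ((↑m : Int) + 1) 1).foldl
          (fun dp j => pvSet2 dp i j (pvGet2 dp i j + pvGet2 dp (i - 1) (j - (↑cn : Int)))) dp) dp) i' j'
      = pvCount (L ++ [(↑cn : Int)]) (L.length + 1) i' (↑j') := by
  intro t
  induction hfuel : (n - t) generalizing t with
  | zero =>
    intro htn dp hwf hdp
    rw [PySem.List.pyRange_one_eq_nil (show ((↑n : Int) + 1) ≤ (↑(t + 1) : Int) by push_cast; omega)]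
    simp only [List.foldl_nil]
    exact ⟨hwf, fun i' j' hi' hj' => by rw [hdp i' j' hi' hj', if_pos (by omega)]⟩
  | succ f ih =>
    intro htn dp hwf hdp
    have htlt : t < n := by omega
    rw [PySem.List.pyRange_one_cons (show (↑(t + 1) : Int) < ((↑n : Int) + 1) by push_cast; omega)]
    simp only [List.foldl_cons]
    obtain ⟨hwf1, hchar⟩ := inner_char m n cn (t + 1) (by omega) (by omega) cn le_rfl dp hwf
    set dp1 := (PySem.List.pyRange (↑cn : Int) ((↑m : Int) + 1) 1).foldl
      (fun dp j => pvSet2 dp (↑(t + 1) : Int) j (pvGet2 dp (↑(t + 1) : Int) j + pvGet2 dp ((↑(t + 1) : Int) - 1) (j - (↑cn : Int)))) dp with hdp1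
    have hgetc : (L ++ [(↑cn : Int)]).getD L.length 0 = (↑cn : Int) := by
      simp [List.getD_eq_getElem?_getD]
    have hinv1 : ∀ i' j' : Nat, i' ≤ n → j' ≤ m → gN dp1 i' j' =
        if i' ≤ t + 1 then pvCount (L ++ [(↑cn : Int)]) (L.length + 1) i' (↑j') else pvCount L L.length i' (↑j') := by
      intro i' j' hi' hj'
      rw [hchar i' j' hi' hj']
      by_cases hii : i' = t + 1
      · subst hii
        by_cases hcj : cn ≤ j'
        · rw [if_pos ⟨rfl, hcj⟩, if_pos (by omega)]
          rw [hdp _ _ hi' hj', hdp (t + 1 - 1) (j' - cn) (by omega) (by omega)]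
          rw [if_neg (by omega), if_pos (by omega)]
          rw [pvCount_succ _ _ _ _ (by omega : t + 1 ≠ 0), hgetc]
          rw [pvCount_append L _ _ _ (le_refl L.length)]
          rw [if_pos (by exact_mod_cast Nat.cast_le.mpr hcj)]
          have : (↑j' : Int) - (↑cn : Int) = ((↑(j' - cn) : Nat) : Int) := by push_cast; omega
          rw [this]
        · rw [if_neg (by omega), if_pos (by omega), hdp _ _ hi' hj', if_neg (by omega)]
          rw [pvCount_succ _ _ _ _ (by omega : t + 1 ≠ 0), hgetc]
          rw [pvCount_append L _ _ _ (le_refl L.length)]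
          rw [if_neg (by exact_mod_cast fun h => hcj (Nat.cast_le.mp h))]
          norm_num
      · rw [if_neg (by omega), hdp _ _ hi' hj']
        by_cases hle : i' ≤ t
        · rw [if_pos hle, if_pos (by omega)]
        · rw [if_neg hle, if_neg (by omega)]
    have hcast : ((↑(t + 1) : Int)) + 1 = ((↑(t + 2) : Nat) : Int) := by push_cast; ring
    rw [hcast]
    exact ih (t + 1) (by omega) (by omega) dp1 hwf1 hinv1

theorem coinPass_char (m n cn : Nat) (L : List Int) (dp : List (List Int)) (hwf : WFt dp n m)
    (hdp : ∀ i' j' : Nat, i' ≤ n → j' ≤ m → gN dp i' j' = pvCount L L.length i' (↑j')) :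
    WFt (pvCoinPass (↑m) (↑n) dp (↑cn)) n m ∧
    ∀ i' j' : Nat, i' ≤ n → j' ≤ m →
      gN (pvCoinPass (↑m) (↑n) dp (↑cn)) i' j' = pvCount (L ++ [(↑cn : Int)]) (L.length + 1) i' (↑j') := by
  have h1 : (1 : Int) = ((↑(0 + 1) : Nat) : Int) := by simp
  unfold pvCoinPass
  rw [h1]
  refine iloop_aux m n cn L 0 (Nat.zero_le n) dp hwf ?_
  intro i' j' hi' hj'
  rw [hdp i' j' hi' hj']
  by_cases h0 : i' = 0
  · subst h0; rw [if_pos (le_refl 0), pvCount_k0, pvCount_k0]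
  · rw [if_neg (by omega)]

theorem coins_fold (m n : Nat) (dp0 : List (List Int)) (hwf0 : WFt dp0 n m)
    (hdp0 : ∀ i' j' : Nat, i' ≤ n → j' ≤ m → gN dp0 i' j' = pvCount [] 0 i' (↑j')) :
    ∀ (coins : List Int), (∀ p ∈ coins, 0 ≤ p) →
    WFt (coins.foldl (pvCoinPass (↑m) (↑n)) dp0) n m ∧
    ∀ i' j' : Nat, i' ≤ n → j' ≤ m →
      gN (coins.foldl (pvCoinPass (↑m) (↑n)) dp0) i' j' = pvCount coins coins.length i' (↑j') := by
  intro coins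
  induction coins using List.reverseRecOn with
  | nil =>
    intro _
    exact ⟨hwf0, fun i' j' h1 h2 => by simpa using hdp0 i' j' h1 h2⟩
  | append_singleton cs c ihc =>
    intro hall
    have hcs : ∀ p ∈ cs, 0 ≤ p := fun p hp => hall p (List.mem_append_left _ hp)
    have hc0 : 0 ≤ c := hall c (by simp)
    obtain ⟨hwfT, hT⟩ := ihc hcs
    rw [List.foldl_append]
    simp only [List.foldl_cons, List.foldl_nil]
    have hc : c = ((c.toNat : Nat) : Int) := (Int.toNat_of_nonneg hc0).symm
    rw [hc]
    obtain ⟨hwfR, hR⟩ := coinPass_char m n c.toNat cs _ hwfT (fun i' j' h1 h2 => hT i' j' h1 h2)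
    refine ⟨hwfR, ?_⟩
    intro i' j' h1 h2
    rw [hR i' j' h1 h2]
    simp

theorem pvInit_eq (m n : Nat) :
    pvInit (↑m) (↑n) = List.replicate (n + 1) (List.replicate (m + 1) (0 : Int)) := by
  simp [pvInit, PySem.List.length_pyRange_one]

theorem init_wf (m n : Nat) : WFt (pvInit (↑m) (↑n)) n m := by
  rw [pvInit_eq]
  refine ⟨by simp, ?_⟩
  intro r hr
  rw [List.eq_of_mem_replicate hr]
  simp

theorem init_g (m n : Nat) (i' j' : Nat) : gN (pvInit (↑m) (↑n)) i' j' = 0 := by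
  rw [pvInit_eq]
  simp only [gN, List.getD_eq_getElem?_getD, List.getElem?_replicate]
  by_cases h : i' < n + 1 <;> by_cases h2 : j' < m + 1 <;> simp [h, h2]

theorem base_wf (m n : Nat) : WFt (pvSet2 (pvInit (↑m) (↑n)) 0 0 1) n m := by
  have h := WFt_set (init_wf m n) (Nat.zero_le n) (Nat.zero_le m) 1
  simpa [pvSet2] using h

theorem base_g (m n : Nat) (i' j' : Nat) (hi' : i' ≤ n) (hj' : j' ≤ m) :
    gN (pvSet2 (pvInit (↑m) (↑n)) 0 0 1) i' j' = pvCount [] 0 i' (↑j') := by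
  have h := gN_set (init_wf m n) (Nat.zero_le n) (Nat.zero_le m) 1 i' j'
  have hb : pvSet2 (pvInit (↑m) (↑n)) 0 0 1
      = (pvInit (↑m) (↑n)).set 0 (((pvInit (↑m) (↑n)).getD 0 []).set 0 1) := by simp [pvSet2]
  rw [hb, h]
  by_cases h0 : i' = 0
  · subst h0
    rw [pvCount_k0]
    by_cases hj0 : j' = 0
    · subst hj0; simp
    · rw [if_neg (by omega), if_neg (by exact_mod_cast hj0), init_g]
  · rw [if_neg (by omega), pvCount_idx0 _ _ _ h0, init_g]

theorem main_eq (primes : List Int) (money_owed num_coins : Int)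
    (h1 : 0 ≤ money_owed) (h2 : 0 ≤ num_coins) (h3 : 0 < num_coins → ∀ p ∈ primes, 0 ≤ p) :
    get_combinations2 primes money_owed num_coins = get_combinations2_alt primes money_owed num_coins := by
  have hm : money_owed = ((money_owed.toNat : Nat) : Int) := (Int.toNat_of_nonneg h1).symm
  have hn : num_coins = ((num_coins.toNat : Nat) : Int) := (Int.toNat_of_nonneg h2).symm
  set m := money_owed.toNat with hmdef
  set n := num_coins.toNat with hndef
  rw [get_combinations2, get_combinations2_alt, hm, hn]
  simp only [Int.toNat_natCast]
  by_cases hnum : n = 0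
  · rw [hnum]
    have hpass : ∀ dp c, pvCoinPass (↑m) ((↑(0:Nat) : Int)) dp c = dp := by
      intro dp c
      unfold pvCoinPass
      rw [PySem.List.pyRange_one_eq_nil (show ((↑(0:Nat) : Int) + 1) ≤ 1 by norm_num)]
      rfl
    have hfold : ∀ (l : List Int) dp, l.foldl (pvCoinPass (↑m) ((↑(0:Nat) : Int))) dp = dp := by
      intro l
      induction l with
      | nil => intro dp; rfl
      | cons c cs ihc => intro dp; rw [List.foldl_cons, hpass, ihc]
    rw [hfold, pvGet2_cast, base_g m 0 0 m (le_refl 0) (le_refl m), pvCount_k0]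
    rcases Nat.eq_zero_or_pos primes.length with hlen | hlen
    · rw [List.length_eq_zero_iff.mp hlen]
      rw [pvCount_k0]
    · rw [pvCount_k0]
  · have hall : ∀ p ∈ primes, 0 ≤ p := h3 (by omega)
    obtain ⟨hwfF, hF⟩ := coins_fold m n (pvSet2 (pvInit (↑m) (↑n)) 0 0 1) (base_wf m n)
      (fun i' j' hi' hj' => base_g m n i' j' hi' hj') primes hall
    rw [pvGet2_cast, hF n m (le_refl n) (le_refl m)]

-- ===== VERDICT (by name: the statement is the Claim_ definition above) =====
theorem get_combinations2_spec : Claim_equal_get_combinations2 := by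
  intro primes money_owed num_coins _ hpre
  unfold Spec_get_combinations2
  exact main_eq primes money_owed num_coins hpre.1 hpre.2.1 hpre.2.2
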